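-- pv_equiv track=rewrite | github.com/ahmadjehad2000/LureNet-1.3 | lurenet/analysis/threat_intel.py | _calculate_verdict
-- ===== SOURCE A (Python) =====
-- from typing import Dict, Any, Optional
--
-- def _calculate_verdict(sources: Dict) -> str:
--     """Calculate overall verdict from sources"""
--     verdicts = []
--     for source_name, source_data in sources.items():
--         if source_data and isinstance(source_data, dict):
--             verdict = source_data.get('verdict', 'unknown')
--             if verdict != 'unknown':
--                 verdicts.append(verdict)
--
--     if 'malicious' in verdicts:
--         return 'malicious'
--     elif 'suspicious' in verdicts:
--         return 'suspicious'
--     elif 'clean' in verdicts: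
--         return 'clean'
--     else:
--         return 'unknown'
-- ===== SOURCE B (Python) =====
-- _PRIORITY = {'malicious': 3, 'suspicious': 2, 'clean': 1}
-- _NAMES = {3: 'malicious', 2: 'suspicious', 1: 'clean'}
--
-- def _calculate_verdict(sources):
--     """Calculate overall verdict from sources (priority-max fold)."""
--     best = 0
--     for source_data in sources.values():
--         if source_data and isinstance(source_data, dict):
--             best = max(best, _PRIORITY.get(source_data.get('verdict', 'unknown'), 0))
--     return _NAMES.get(best, 'unknown')
-- ===== Notes on version B (the rewrite author's own statement) =====
-- stated objective: simpler
-- what changed: Replaces the collect-all-verdicts-list plus three membership probes with a single priority-max fold over the sources, mapping the best rank back to its verdict string.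
import Mathlib
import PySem

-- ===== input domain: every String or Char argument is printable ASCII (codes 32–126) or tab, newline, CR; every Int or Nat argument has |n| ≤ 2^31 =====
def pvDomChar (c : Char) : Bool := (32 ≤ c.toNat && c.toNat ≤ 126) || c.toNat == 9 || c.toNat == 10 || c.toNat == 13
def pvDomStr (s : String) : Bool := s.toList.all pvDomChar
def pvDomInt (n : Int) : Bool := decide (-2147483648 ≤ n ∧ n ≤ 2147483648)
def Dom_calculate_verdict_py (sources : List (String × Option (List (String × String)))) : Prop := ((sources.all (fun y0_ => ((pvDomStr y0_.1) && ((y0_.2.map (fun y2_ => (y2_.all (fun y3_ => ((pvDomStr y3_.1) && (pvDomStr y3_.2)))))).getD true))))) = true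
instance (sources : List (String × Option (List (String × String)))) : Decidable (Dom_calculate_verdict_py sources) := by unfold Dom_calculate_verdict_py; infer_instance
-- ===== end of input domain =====

-- B replaces A's collect-verdicts-list + three membership probes by a single
-- priority-max fold mapped back to a verdict name (objective: simpler).

-- ===== PORT A =====
-- loop body of A: truthy dict (some, non-empty), get 'verdict' with default, keep if ≠ 'unknown'
def pvStepA (vs : List String) (p : String × Option (List (String × String))) : List String :=
  match p.2 with
  | some d =>
      if d ≠ [] then
        let v := (PySem.Dict.mk d).getD "verdict" "unknown"
        if v ≠ "unknown" then vs ++ [v] else vs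
      else vs
  | none => vs

def calculate_verdict_py (sources : List (String × Option (List (String × String)))) : String :=
  let verdicts := sources.foldl pvStepA []
  if "malicious" ∈ verdicts then "malicious"
  else if "suspicious" ∈ verdicts then "suspicious"
  else if "clean" ∈ verdicts then "clean"
  else "unknown"

-- ===== PORT B =====
-- _PRIORITY.get(v, 0)
def pvPriority (v : String) : Int :=
  if v = "malicious" then 3 else if v = "suspicious" then 2 else if v = "clean" then 1 else 0

-- loop body of B: best = max(best, priority of entry's verdict) for truthy dict entries
def pvStepB (b : Int) (p : String × Option (List (String × String))) : Int :=
  match p.2 with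
  | some d =>
      if d ≠ [] then max b (pvPriority ((PySem.Dict.mk d).getD "verdict" "unknown"))
      else b
  | none => b

def calculate_verdict_py_alt (sources : List (String × Option (List (String × String)))) : String :=
  let best := sources.foldl pvStepB 0
  -- _NAMES.get(best, 'unknown')
  if best = 3 then "malicious"
  else if best = 2 then "suspicious"
  else if best = 1 then "clean"
  else "unknown"

-- ===== PRECONDITION & SPEC =====
def Spec_calculate_verdict_py (sources : List (String × Option (List (String × String)))) (out : String) : Prop := out = calculate_verdict_py_alt sources
instance (sources : List (String × Option (List (String × String)))) (out : String) : Decidable (Spec_calculate_verdict_py sources out) := by unfold Spec_calculate_verdict_py; infer_instance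

-- ===== CLAIM (what is proved, stated in full; the proofs are below) =====
def Claim_equal_calculate_verdict_py : Prop := ∀ (sources : List (String × Option (List (String × String)))), Dom_calculate_verdict_py sources → Spec_calculate_verdict_py sources (calculate_verdict_py sources)

-- ===== LEMMAS AND PROOFS =====

-- the verdict A's loop extracts from one entry (none = entry skipped)
def pvEV (p : String × Option (List (String × String))) : Option String :=
  match p.2 with
  | some d =>
      if d ≠ [] then
        let v := (PySem.Dict.mk d).getD "verdict" "unknown"
        if v ≠ "unknown" then some v else none
      else none
  | none => none

def pvVlist (l : List (String × Option (List (String × String)))) : List String :=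
  l.foldr (fun p acc => match pvEV p with | some v => v :: acc | none => acc) []

theorem pvStepA_eq (vs : List String) (p : String × Option (List (String × String))) :
    pvStepA vs p = vs ++ (match pvEV p with | some v => [v] | none => []) := by
  unfold pvStepA pvEV
  rcases p with ⟨k, d⟩
  cases d with
  | none => simp
  | some d =>
      by_cases h : d = [] <;> simp [h]
      split_ifs <;> simp

theorem foldlA_eq (l : List (String × Option (List (String × String)))) :
    ∀ vs, l.foldl pvStepA vs = vs ++ pvVlist l := by
  induction l with
  | nil => intro vs; simp [pvVlist]
  | cons p t ih =>
      intro vs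
      simp only [List.foldl_cons, pvStepA_eq, ih, pvVlist, List.foldr_cons]
      cases h : pvEV p <;> simp [h]

theorem pvPriority_le (v : String) : pvPriority v ≤ 3 := by
  unfold pvPriority; split_ifs <;> norm_num

theorem pvStepB_eq (b : Int) (hb : 0 ≤ b) (p : String × Option (List (String × String))) :
    pvStepB b p = (match pvEV p with | some v => max b (pvPriority v) | none => b) := by
  unfold pvStepB pvEV
  rcases p with ⟨k, d⟩
  cases d with
  | none => simp
  | some d =>
      by_cases h : d = [] <;> simp only [h, ne_eq, not_true_eq_false, if_false, not_false_eq_true, if_true]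
      by_cases hv : (PySem.Dict.mk d).getD "verdict" "unknown" = "unknown"
      · simp [hv, pvPriority, max_eq_left hb]
      · simp [hv]

theorem foldlB_eq (l : List (String × Option (List (String × String)))) :
    ∀ b, 0 ≤ b → l.foldl pvStepB b = ((pvVlist l).map pvPriority).foldl max b := by
  induction l with
  | nil => intro b _; simp [pvVlist]
  | cons p t ih =>
      intro b hb
      simp only [List.foldl_cons, pvStepB_eq b hb, pvVlist, List.foldr_cons]
      cases h : pvEV p with
      | none => exact ih b hb
      | some v =>
          simp only [List.map_cons, List.foldl_cons]
          exact ih _ (le_trans hb (le_max_left _ _))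

theorem foldl_max_eq_or_mem (l : List Int) : ∀ b, l.foldl max b = b ∨ l.foldl max b ∈ l := by
  induction l with
  | nil => intro b; simp
  | cons x t ih =>
      intro b
      simp only [List.foldl_cons]
      rcases ih (max b x) with h | h
      · rcases le_total b x with hbx | hbx
        · right; rw [h, max_eq_right hbx]; exact List.mem_cons_self
        · left; rw [h, max_eq_left hbx]
      · right; exact List.mem_cons_of_mem _ h

theorem foldl_max_le (l : List Int) : ∀ b c, b ≤ c → (∀ x ∈ l, x ≤ c) → l.foldl max b ≤ c := by
  induction l with
  | nil => intro b c hb _; simpa using hb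
  | cons x t ih =>
      intro b c hb hl
      exact ih _ _ (max_le hb (hl x List.mem_cons_self)) (fun y hy => hl y (List.mem_cons_of_mem _ hy))

theorem pvPriority_eq_three (v : String) (h : pvPriority v = 3) : v = "malicious" := by
  unfold pvPriority at h; split_ifs at h with h1 h2 h3 <;> first | assumption | omega

theorem pvPriority_eq_two (v : String) (h : pvPriority v = 2) : v = "suspicious" := by
  unfold pvPriority at h; split_ifs at h with h1 h2 h3 <;> first | assumption | omega

theorem pvPriority_eq_one (v : String) (h : pvPriority v = 1) : v = "clean" := by
  unfold pvPriority at h; split_ifs at h with h1 h2 h3 <;> first | assumption | omega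

-- M = k (k ∈ {1,2,3}) forces a member of priority k
theorem max_eq_mem (V : List String) (k : Int) (hk : 1 ≤ k)
    (h : (V.map pvPriority).foldl max 0 = k) : ∃ v ∈ V, pvPriority v = k := by
  rcases foldl_max_eq_or_mem (V.map pvPriority) 0 with h0 | hm
  · omega
  · rw [h] at hm
    rcases List.mem_map.mp hm with ⟨v, hv, hpv⟩
    exact ⟨v, hv, hpv⟩

theorem mem_le_max (V : List String) (v : String) (hv : v ∈ V) :
    pvPriority v ≤ (V.map pvPriority).foldl max 0 :=
  (PySem.List.le_foldl_max (V.map pvPriority) 0).2 _ (List.mem_map_of_mem hv)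

theorem max_le_three (V : List String) : (V.map pvPriority).foldl max 0 ≤ 3 :=
  foldl_max_le _ _ _ (by norm_num) (by intro x hx; rcases List.mem_map.mp hx with ⟨v, _, rfl⟩; exact pvPriority_le v)

-- ===== VERDICT (by name: the statement is the Claim_ definition above) =====
theorem calculate_verdict_py_spec : Claim_equal_calculate_verdict_py := by
  intro sources _
  unfold Spec_calculate_verdict_py calculate_verdict_py calculate_verdict_py_alt
  rw [foldlA_eq sources [], foldlB_eq sources 0 le_rfl]
  simp only [List.nil_append]
  set V := pvVlist sources with hV
  set M := (V.map pvPriority).foldl max 0 with hM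
  have hle3 : M ≤ 3 := max_le_three V
  by_cases hm : "malicious" ∈ V
  · have h3 : M = 3 := by
      have := mem_le_max V _ hm
      simp [pvPriority] at this
      omega
    simp [hm, h3]
  · have hM3 : M ≠ 3 := by
      intro h
      rcases max_eq_mem V 3 (by norm_num) h with ⟨v, hv, hpv⟩
      exact hm (pvPriority_eq_three v hpv ▸ hv)
    by_cases hs : "suspicious" ∈ V
    · have h2 : M = 2 := by
        have := mem_le_max V _ hs
        simp [pvPriority] at this
        omega
      simp [hm, hs, h2]
    · have hM2 : M ≠ 2 := by
        intro h
        rcases max_eq_mem V 2 (by norm_num) h with ⟨v, hv, hpv⟩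
        exact hs (pvPriority_eq_two v hpv ▸ hv)
      by_cases hc : "clean" ∈ V
      · have h1 : M = 1 := by
          have := mem_le_max V _ hc
          simp [pvPriority] at this
          omega
        simp [hm, hs, hc, h1]
      · have hM1 : M ≠ 1 := by
          intro h
          rcases max_eq_mem V 1 le_rfl h with ⟨v, hv, hpv⟩
          exact hc (pvPriority_eq_one v hpv ▸ hv)
        simp [hm, hs, hc, hM3, hM2, hM1]
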